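-- pv_equiv track=rewrite | github.com/pioneer1541/jarvis-mcp-stack | patch_weather_guard_nextdays_v1.py | find_func_block
-- ===== SOURCE A (Python) =====
-- def find_func_block(lines, func_name):
--     start = -1
--     for i, ln in enumerate(lines):
--         if ln.startswith("def " + func_name + "("):
--             start = i
--             break
--     if start < 0:
--         return (-1, -1)
--     end = len(lines)
--     for j in range(start + 1, len(lines)):
--         if lines[j].startswith("def "):
--             end = j
--             break
--     return (start, end)
-- ===== SOURCE B (Python) =====
-- def find_func_block(lines, func_name):
--     # Index all function-boundary lines once, then navigate the index.
--     defs = [i for i, ln in enumerate(lines) if ln.startswith("def ")]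
--     prefix = "def " + func_name + "("
--     starts = [i for i in defs if lines[i].startswith(prefix)]
--     if not starts:
--         return (-1, -1)
--     start = starts[0]
--     later = [i for i in defs if i > start]
--     end = later[0] if later else len(lines)
--     return (start, end)
-- ===== Notes on version B (the rewrite author's own statement) =====
-- stated objective: alternative
-- what changed: B builds an explicit index of all 'def ' boundary lines in one comprehension and then navigates it (first boundary matching the full prefix, next boundary after it), instead of A's two break-on-first-hit scans; the prefix string is built once instead of per iteration.
import Mathlib
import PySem

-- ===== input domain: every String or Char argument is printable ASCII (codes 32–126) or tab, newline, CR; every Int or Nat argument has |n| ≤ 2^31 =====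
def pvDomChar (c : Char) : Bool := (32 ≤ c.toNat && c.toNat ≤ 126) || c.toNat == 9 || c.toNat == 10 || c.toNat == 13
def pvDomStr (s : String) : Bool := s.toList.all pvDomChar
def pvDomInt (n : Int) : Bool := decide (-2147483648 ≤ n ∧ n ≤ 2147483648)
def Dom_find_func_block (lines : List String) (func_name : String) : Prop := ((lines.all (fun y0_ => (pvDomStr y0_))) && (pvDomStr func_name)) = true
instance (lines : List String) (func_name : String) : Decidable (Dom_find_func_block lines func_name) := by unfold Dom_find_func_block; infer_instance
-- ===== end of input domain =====

-- B replaces A's two break-on-first-hit scans by an explicit index of all "def " boundary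
-- lines built once, which it then navigates (objective: alternative; same cost).


-- ===== PORT A =====
-- first loop: for i, ln in enumerate(lines): if ln.startswith(pref): start = i; break
def aScanStart (pref : String) : List (Int × String) → Int
  | [] => -1
  | (i, ln) :: rest =>
    if PySem.Str.startswith ln pref then i else aScanStart pref rest

-- second loop: for j in range(start+1, len(lines)): if lines[j].startswith("def "): end = j; break
def aScanEnd (lines : List String) : List Int → Int
  | [] => (lines.length : Int)
  | j :: rest =>
    if PySem.Str.startswith ((PySem.List.pyGet? lines j).getD "") "def " then j
    else aScanEnd lines rest

def find_func_block (lines : List String) (func_name : String) : Int × Int :=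
  let start := aScanStart ("def " ++ func_name ++ "(") (PySem.List.enumerate lines)
  if start < 0 then (-1, -1)
  else (start, aScanEnd lines (PySem.List.pyRange (start + 1) lines.length 1))

-- ===== PORT B =====
def find_func_block_alt (lines : List String) (func_name : String) : Int × Int :=
  let defs := ((PySem.List.enumerate lines).filter
      (fun p => PySem.Str.startswith p.2 "def ")).map Prod.fst
  let pref := "def " ++ func_name ++ "("
  let starts := defs.filter
      (fun i => PySem.Str.startswith ((PySem.List.pyGet? lines i).getD "") pref)
  match starts with
  | [] => (-1, -1)
  | s :: _ =>
    let later := defs.filter (fun i => decide (s < i))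
    (s, match later with
        | [] => (lines.length : Int)
        | t :: _ => t)

-- ===== PRECONDITION & SPEC =====
def Spec_find_func_block (lines : List String) (func_name : String) (out : Int × Int) : Prop := out = find_func_block_alt lines func_name
instance (lines : List String) (func_name : String) (out : Int × Int) : Decidable (Spec_find_func_block lines func_name out) := by unfold Spec_find_func_block; infer_instance

-- ===== CLAIM (what is proved, stated in full; the proofs are below) =====
def Claim_equal_find_func_block : Prop := ∀ (lines : List String) (func_name : String), Dom_find_func_block lines func_name → Spec_find_func_block lines func_name (find_func_block lines func_name)

-- ===== LEMMAS AND PROOFS =====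

-- a line starting with the full prefix "def <name>(" starts with "def "
theorem sw_mono (ln x : String) (h : PySem.Str.startswith ln ("def " ++ x) = true) :
    PySem.Str.startswith ln "def " = true := by
  simp only [PySem.Str.startswith_eq, PySem.Chars.startswith_iff] at h ⊢
  have : "def ".toList <+: ("def " ++ x).toList := by
    rw [String.toList_append]; exact List.prefix_append _ _
  exact this.trans h

-- characterization of A's first loop over an arbitrary enumerate-style list
theorem aScanStart_eq (pref : String) (ps : List (Int × String)) :
    aScanStart pref ps =
      match (ps.filter (fun p => PySem.Str.startswith p.2 pref)).map Prod.fst with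
      | [] => -1
      | i :: _ => i := by
  induction ps with
  | nil => rfl
  | cons p rest ih =>
    obtain ⟨i, ln⟩ := p
    simp only [aScanStart, List.filter_cons, PySem.Str.startswith_eq]
    by_cases h : PySem.Chars.startswith ln.toList pref.toList = true
    · simp [h]
    · simp [h, ih]

-- any element of an enumerate list is (k, lines[k])
theorem mem_filter_enumerate (lines : List String) (f : Int × String → Bool)
    (p : Int × String) (hp : p ∈ (PySem.List.enumerate lines).filter f) :
    ∃ (k : Nat) (_ : k < lines.length), p = ((k : Int), lines[k]) := by
  have := (List.mem_filter.mp hp).1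
  rw [PySem.List.mem_enumerate_iff] at this
  obtain ⟨k, hk, hpk⟩ := this
  exact ⟨k, hk, by simpa using hpk⟩

-- B's starts list collapses to a single filter over the enumerate list
theorem starts_eq (lines : List String) (pref : String) :
    ((((PySem.List.enumerate lines).filter
        (fun p => PySem.Str.startswith p.2 "def ")).map Prod.fst).filter
      (fun i => PySem.Str.startswith ((PySem.List.pyGet? lines i).getD "") ("def " ++ pref))) =
    ((PySem.List.enumerate lines).filter
        (fun p => PySem.Str.startswith p.2 ("def " ++ pref))).map Prod.fst := by
  rw [List.filter_map, List.filter_filter]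
  congr 1
  apply List.filter_congr
  intro p hp
  rw [PySem.List.mem_enumerate_iff] at hp
  obtain ⟨k, hk, rfl⟩ := hp
  show (_ && _) = _
  by_cases h : PySem.Str.startswith lines[k] ("def " ++ pref) = true
  · have h2 := sw_mono lines[k] pref h
    simp only [PySem.Str.startswith_eq] at h h2
    simp at h h2
    simp [List.getElem?_eq_getElem hk, h, h2]
  · simp only [PySem.Str.startswith_eq] at h
    simp at h
    simp [List.getElem?_eq_getElem hk, h]

-- characterization of A's second loop: first "def " line at index ≥ t, else len(lines)
theorem aScanEnd_eq (lines : List String) : ∀ (m t : Nat), lines.length ≤ t + m →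
    aScanEnd lines (PySem.List.pyRange (t : Int) (lines.length : Int) 1) =
      match (lines.drop t).findIdx? (fun l => PySem.Str.startswith l "def ") with
      | none => (lines.length : Int)
      | some r => ((t + r : Nat) : Int) := by
  intro m
  induction m with
  | zero =>
    intro t h
    rw [PySem.List.pyRange_one_eq_nil (by exact_mod_cast h),
        List.drop_eq_nil_of_le (by omega)]
    rfl
  | succ m ih =>
    intro t h
    by_cases ht : lines.length ≤ t
    · rw [PySem.List.pyRange_one_eq_nil (by exact_mod_cast ht),
          List.drop_eq_nil_of_le (by omega)]
      rfl
    · have ht' : t < lines.length := by omega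
      rw [PySem.List.pyRange_one_cons (by exact_mod_cast ht'),
          List.drop_eq_getElem_cons ht', List.findIdx?_cons]
      simp only [aScanEnd, PySem.List.pyGet?_natCast, List.getElem?_eq_getElem ht',
        Option.getD_some]
      by_cases hd : PySem.Chars.startswith lines[t].toList ['d', 'e', 'f', ' '] = true
      · simp [hd]
      · have hcast : ((t : Int) + 1) = ((t + 1 : Nat) : Int) := by push_cast; ring
        rw [hcast, ih (t + 1) (by omega)]
        rw [Bool.not_eq_true] at hd
        simp only [PySem.Str.startswith_eq]
        cases hfi : (lines.drop (t + 1)).findIdx?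
            (fun l => PySem.Chars.startswith l.toList ['d', 'e', 'f', ' ']) with
        | none => simp [hfi, hd]
        | some r => simp [hfi, hd]; ring

-- head of the indices of f-lines in an enumerate-from-s list, via findIdx?
theorem head_enumerate_filter (f : String → Bool) :
    ∀ (xs : List String) (s : Nat),
    (((PySem.List.enumerate xs (s : Int)).filter (fun p => f p.2)).map Prod.fst).head? =
      (xs.findIdx? f).map (fun r => ((s + r : Nat) : Int)) := by
  intro xs
  induction xs with
  | nil => intro s; simp [PySem.List.enumerate_nil]
  | cons x xs ih =>
    intro s
    rw [PySem.List.enumerate_cons, List.findIdx?_cons, List.filter_cons]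
    by_cases hf : f x = true
    · simp [hf]
    · simp only [Bool.not_eq_true] at hf
      have : ((s : Int) + 1) = ((s + 1 : Nat) : Int) := by push_cast; ring
      rw [hf, this]
      simp only [Bool.false_eq_true, if_false]
      rw [ih (s + 1)]
      cases hfi : xs.findIdx? f with
      | none => simp
      | some r => simp only [Option.map_some]; congr 1; omega

-- B's 'later' list is exactly the boundary index of the tail beyond position k
theorem later_eq (lines : List String) (k : Nat) (hk : k < lines.length) :
    ((((PySem.List.enumerate lines).filter
        (fun p => PySem.Str.startswith p.2 "def ")).map Prod.fst).filter
      (fun i => decide (((k : Nat) : Int) < i))) =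
    ((PySem.List.enumerate (lines.drop (k + 1)) ((k + 1 : Nat) : Int)).filter
        (fun p => PySem.Str.startswith p.2 "def ")).map Prod.fst := by
  rw [List.filter_map, List.filter_filter]
  conv_lhs => rw [← List.take_append_drop (k + 1) lines]
  rw [PySem.List.enumerate_append, List.filter_append, List.map_append]
  have hlen : ((lines.take (k + 1)).length : Int) = ((k + 1 : Nat) : Int) := by
    rw [List.length_take]; push_cast; omega
  have h1 : ((PySem.List.enumerate (lines.take (k + 1))).filter
      (fun a => ((fun i => decide (((k : Nat) : Int) < i)) ∘ Prod.fst) a &&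
        PySem.Str.startswith a.2 "def ")) = [] := by
    rw [List.filter_eq_nil_iff]
    intro p hp
    rw [PySem.List.mem_enumerate_iff] at hp
    obtain ⟨j, hj, rfl⟩ := hp
    have hjk : j ≤ k := by
      have := List.length_take_le (k + 1) lines
      omega
    simp only [Function.comp, Bool.and_eq_true, decide_eq_true_eq]
    intro h
    have : ((k : Nat) : Int) < (0 : Int) + (j : Nat) := h.1
    omega
  have h2 : ((PySem.List.enumerate (lines.drop (k + 1)) (0 + ((lines.take (k + 1)).length : Int))).filter
      (fun a => ((fun i => decide (((k : Nat) : Int) < i)) ∘ Prod.fst) a &&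
        PySem.Str.startswith a.2 "def ")) =
      (PySem.List.enumerate (lines.drop (k + 1)) ((k + 1 : Nat) : Int)).filter
        (fun p => PySem.Str.startswith p.2 "def ") := by
    rw [show (0 + ((lines.take (k + 1)).length : Int)) = ((k + 1 : Nat) : Int) by omega]
    apply List.filter_congr
    intro p hp
    rw [PySem.List.mem_enumerate_iff] at hp
    obtain ⟨j, hj, rfl⟩ := hp
    simp only [Function.comp]
    have : decide (((k : Nat) : Int) < ((k + 1 : Nat) : Int) + (j : Nat)) = true := by
      rw [decide_eq_true_eq]; push_cast; omega
    rw [this, Bool.true_and]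
  rw [h1, h2]
  simp

-- match-to-head? bridge
theorem match_headD (l : List Int) (a : Int) :
    (match l with | [] => a | t :: _ => t) = l.head?.getD a := by
  cases l <;> rfl

-- ===== VERDICT (by name: the statement is the Claim_ definition above) =====
theorem find_func_block_spec : Claim_equal_find_func_block := by
  intro lines fn _
  unfold Spec_find_func_block find_func_block find_func_block_alt
  simp only [String.append_assoc]
  rw [aScanStart_eq, starts_eq]
  cases hSL : ((PySem.List.enumerate lines).filter
      (fun p => PySem.Str.startswith p.2 ("def " ++ (fn ++ "(")))).map Prod.fst with
  | nil => simp
  | cons s rest =>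
    have hmem : s ∈ ((PySem.List.enumerate lines).filter
        (fun p => PySem.Str.startswith p.2 ("def " ++ (fn ++ "(")))).map Prod.fst := by
      rw [hSL]; exact List.mem_cons_self
    obtain ⟨p, hp, hps⟩ := List.mem_map.mp hmem
    obtain ⟨k, hk, rfl⟩ := mem_filter_enumerate lines _ p hp
    subst hps
    have hk0 : ¬ (((k : Nat) : Int) < 0) := by omega
    simp only [hk0, if_false]
    refine Prod.ext rfl ?_
    show aScanEnd lines (PySem.List.pyRange (((k : Nat) : Int) + 1) (lines.length : Int) 1) = _
    rw [show (((k : Nat) : Int) + 1) = ((k + 1 : Nat) : Int) by push_cast; ring,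
        aScanEnd_eq lines lines.length (k + 1) (by omega),
        match_headD, later_eq lines k hk, head_enumerate_filter (fun l => PySem.Str.startswith l "def ") (lines.drop (k + 1)) (k + 1)]
    cases hfi : (lines.drop (k + 1)).findIdx? (fun l => PySem.Str.startswith l "def ") with
    | none => simp
    | some r => simp
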